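-- pv_equiv track=rewrite | github.com/oscarbaltasar/hexcasting-compiler | Compiler/cMacroSimulator.py | evaluate_numerical_pattern
-- ===== SOURCE A (Python) =====
-- def evaluate_numerical_pattern(number):
--     base_pattern = "aqaa"
--     operations = {"w": 1, "q": 5, "e": 10}
--     current_value = 0
--     pattern = []
--
--     while number > 0:
--         if number >= 10:
--             pattern.append("e")
--             number -= 10
--         elif number >= 5:
--             pattern.append("q")
--             number -= 5
--         elif number >= 1:
--             pattern.append("w")
--             number -= 1
--
--     return f"<EAST {base_pattern}{''.join(pattern)}>"
-- ===== SOURCE B (Python) =====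
-- def evaluate_numerical_pattern(number):
--     if number < 1:
--         return "<EAST aqaa>"
--     e, rem = divmod(number, 10)
--     q, w = divmod(rem, 5)
--     return f"<EAST aqaa{'e' * e}{'q' * q}{'w' * w}>"
-- ===== Notes on version B (the rewrite author's own statement) =====
-- stated objective: faster
-- what changed: Replaces the greedy subtract-one-denomination-at-a-time loop with a closed-form divmod computation of the counts of 'e', 'q' and 'w', built by string repetition.
import Mathlib
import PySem

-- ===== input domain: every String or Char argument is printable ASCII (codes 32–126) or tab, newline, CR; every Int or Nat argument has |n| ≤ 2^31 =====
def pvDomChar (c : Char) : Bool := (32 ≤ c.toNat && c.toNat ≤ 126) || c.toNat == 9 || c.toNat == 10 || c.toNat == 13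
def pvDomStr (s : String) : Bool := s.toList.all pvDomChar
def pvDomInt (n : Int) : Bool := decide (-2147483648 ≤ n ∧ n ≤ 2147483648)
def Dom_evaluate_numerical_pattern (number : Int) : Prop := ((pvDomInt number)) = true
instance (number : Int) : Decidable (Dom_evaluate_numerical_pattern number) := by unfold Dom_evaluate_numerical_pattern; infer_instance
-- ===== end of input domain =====

-- B replaces A's greedy subtract loop by a closed-form divmod count of 'e'/'q'/'w'; proved equal on all ints.


-- ===== PORT A =====
-- the while loop of A: greedily append "e"/"q"/"w" while number > 0
def evalNumLoop (number : Int) (pattern : List String) : List String :=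
  if number > 0 then
    if number ≥ 10 then evalNumLoop (number - 10) (pattern ++ ["e"])
    else if number ≥ 5 then evalNumLoop (number - 5) (pattern ++ ["q"])
    else evalNumLoop (number - 1) (pattern ++ ["w"])
  else pattern
termination_by number.toNat
decreasing_by all_goals omega

def evaluate_numerical_pattern (number : Int) : String :=
  let base_pattern := "aqaa"
  let pattern := evalNumLoop number []
  "<EAST " ++ base_pattern ++ PySem.Str.join "" pattern ++ ">"

-- ===== PORT B =====
def evaluate_numerical_pattern_alt (number : Int) : String :=
  if number < 1 then "<EAST aqaa>"
  else
    let e := PySem.Int.floordiv number 10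
    let rem := PySem.Int.mod number 10
    let q := PySem.Int.floordiv rem 5
    let w := PySem.Int.mod rem 5
    "<EAST aqaa" ++ String.ofList (PySem.List.pyRepeat ['e'] e)
      ++ String.ofList (PySem.List.pyRepeat ['q'] q)
      ++ String.ofList (PySem.List.pyRepeat ['w'] w) ++ ">"

-- ===== PRECONDITION & SPEC =====
def Spec_evaluate_numerical_pattern (number : Int) (out : String) : Prop := out = evaluate_numerical_pattern_alt number
instance (number : Int) (out : String) : Decidable (Spec_evaluate_numerical_pattern number out) := by unfold Spec_evaluate_numerical_pattern; infer_instance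

-- ===== CLAIM (what is proved, stated in full; the proofs are below) =====
def Claim_equal_evaluate_numerical_pattern : Prop := ∀ (number : Int), Dom_evaluate_numerical_pattern number → Spec_evaluate_numerical_pattern number (evaluate_numerical_pattern number)

-- ===== LEMMAS AND PROOFS =====
-- the greedy loop yields exactly the closed-form counts of "e", "q", "w"
theorem evalNumLoop_eq (n : Int) (acc : List String) :
    evalNumLoop n acc = acc ++ (List.replicate (n.toNat / 10) "e"
      ++ List.replicate (n.toNat % 10 / 5) "q" ++ List.replicate (n.toNat % 10 % 5) "w") := by
  induction n, acc using evalNumLoop.induct with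
  | case1 n acc hpos hge ih =>
    rw [evalNumLoop, if_pos hpos, if_pos hge, ih]
    have h1 : n.toNat / 10 = (n - 10).toNat / 10 + 1 := by omega
    have h2 : n.toNat % 10 = (n - 10).toNat % 10 := by omega
    simp [h1, h2, List.replicate_succ]
  | case2 n acc hpos hlt hge ih =>
    rw [evalNumLoop, if_pos hpos, if_neg hlt, if_pos hge, ih]
    have h1 : n.toNat / 10 = 0 := by omega
    have h1' : (n - 5).toNat / 10 = 0 := by omega
    have h2 : n.toNat % 10 / 5 = 1 := by omega
    have h2' : (n - 5).toNat % 10 / 5 = 0 := by omega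
    have h3 : n.toNat % 10 % 5 = (n - 5).toNat % 10 % 5 := by omega
    simp [h1, h1', h2, h2', h3, List.replicate_succ]
  | case3 n acc hpos hlt hlt' ih =>
    rw [evalNumLoop, if_pos hpos, if_neg hlt, if_neg hlt', ih]
    have h1 : n.toNat / 10 = 0 := by omega
    have h1' : (n - 1).toNat / 10 = 0 := by omega
    have h2 : n.toNat % 10 / 5 = 0 := by omega
    have h2' : (n - 1).toNat % 10 / 5 = 0 := by omega
    have h3 : n.toNat % 10 % 5 = (n - 1).toNat % 10 % 5 + 1 := by omega
    rw [h1, h1', h2, h2', h3, List.replicate_succ]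
    simp
  | case4 n acc hpos =>
    rw [evalNumLoop, if_neg hpos]
    have h0 : n.toNat = 0 := by omega
    simp [h0]

-- joining singleton character-strings with "" concatenates their characters
theorem join_repl (a b c : Nat) :
    PySem.Chars.join [] (List.replicate a ['e'] ++ (List.replicate b ['q'] ++ List.replicate c ['w']))
      = List.replicate a 'e' ++ (List.replicate b 'q' ++ List.replicate c 'w') := by
  have hmap : List.replicate a ['e'] ++ (List.replicate b ['q'] ++ List.replicate c ['w'])
      = (List.replicate a 'e' ++ (List.replicate b 'q' ++ List.replicate c 'w')).map ([·]) := by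
    simp
  rw [hmap, PySem.Chars.join_nil_singletons]

-- ===== VERDICT (by name: the statement is the Claim_ definition above) =====
theorem evaluate_numerical_pattern_spec : Claim_equal_evaluate_numerical_pattern := by
  intro n _
  unfold Spec_evaluate_numerical_pattern evaluate_numerical_pattern evaluate_numerical_pattern_alt
  by_cases hneg : n < 1
  · have h0 : n.toNat = 0 := by omega
    rw [if_pos hneg, evalNumLoop_eq]
    simp [h0]
    decide
  · rw [if_neg hneg]
    have hd : PySem.Int.floordiv n 10 = n / 10 := PySem.Int.floordiv_eq_ediv_of_pos (by omega)
    have hm : PySem.Int.mod n 10 = n % 10 := PySem.Int.mod_eq_emod_of_pos (by omega)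
    have hd2 : PySem.Int.floordiv (n % 10) 5 = (n % 10) / 5 := PySem.Int.floordiv_eq_ediv_of_pos (by omega)
    have hm2 : PySem.Int.mod (n % 10) 5 = (n % 10) % 5 := PySem.Int.mod_eq_emod_of_pos (by omega)
    have he : (n / 10).toNat = n.toNat / 10 := by omega
    have hq : ((n % 10) / 5).toNat = n.toNat % 10 / 5 := by omega
    have hw : ((n % 10) % 5).toNat = n.toNat % 5 := by omega
    rw [evalNumLoop_eq]
    apply String.toList_injective
    simp [he, hq, PySem.List.pyRepeat_singleton]
    rw [join_repl]
    simp [List.append_assoc]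
    omega
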